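-- pv_equiv track=rewrite | github.com/danve93/graphrag-mrkr-2 | core/tuple_parser.py | _parse_tuple_line
-- ===== SOURCE A (Python) =====
-- from typing import List, Tuple, Optional
--
-- def _parse_tuple_line(line: str) -> Optional[Tuple[str, List[str]]]:
--     """
--     Parse a single tuple line.
--
--     Returns:
--         (tuple_type, fields) or None if not a valid tuple
--
--     Example:
--         Input: '("entity"<|>ADMIN PANEL<|>COMPONENT<|>Description)'
--         Output: ("entity", ["ADMIN PANEL", "COMPONENT", "Description"])
--     """
--     # Check if line looks like a tuple
--     if not (line.startswith('("') and line.endswith(')')):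
--         return None
--
--     # Remove outer parentheses
--     inner = line[1:-1]  # Remove leading ( and trailing )
--
--     # Check for opening quote
--     if not inner.startswith('"'):
--         return None
--
--     # Find closing quote for type field
--     type_end = inner.find('"', 1)
--     if type_end == -1:
--         return None
--
--     # Extract type
--     tuple_type = inner[1:type_end].strip().lower()
--
--     # Get remaining content after type
--     remaining = inner[type_end + 1:]
--
--     # Check for delimiter after type
--     if not remaining.startswith('<|>'):
--         return None
--
--     # Remove leading delimiter
--     remaining = remaining[3:]  # Remove <|>
--
--     # Split by delimiter to get fields
--     fields = remaining.split('<|>')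
--
--     # Trim whitespace from all fields
--     fields = [f.strip() for f in fields]
--
--     return (tuple_type, fields)
-- ===== SOURCE B (Python) =====
-- from typing import List, Tuple, Optional
--
-- def _parse_tuple_line(line: str) -> Optional[Tuple[str, List[str]]]:
--     # Single left-to-right cursor scan: consume the opening parenthesis and
--     # quote, accumulate the type up to the closing quote, require the delimiter,
--     # then accumulate fields char by char (splitting on the delimiter by 3-char
--     # lookahead) and finally check that the last accumulated character is the
--     # closing parenthesis.
--     n = len(line)
--     if n < 2 or line[0] != '(' or line[1] != '"':
--         return None
--     i = 2
--     tbuf = []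
--     while i < n and line[i] != '"':
--         tbuf.append(line[i])
--         i += 1
--     if i == n:
--         return None
--     i += 1
--     if not (i < n and line[i] == '<' and line[i + 1:i + 3] == '|>'):
--         return None
--     i += 3
--     fields = []
--     buf = []
--     while i < n:
--         if line[i] == '<' and line[i + 1:i + 3] == '|>':
--             fields.append(''.join(buf))
--             buf = []
--             i += 3
--         else:
--             buf.append(line[i])
--             i += 1
--     if not buf or buf[-1] != ')':
--         return None
--     fields.append(''.join(buf[:-1]))
--     return (''.join(tbuf).strip().lower(), [f.strip() for f in fields])
-- ===== Notes on version B (the rewrite author's own statement) =====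
-- stated objective: alternative
-- what changed: A's staged pipeline of string methods (startswith/endswith guards, find for the closing quote, slicing, str.split, list comprehension) is replaced by a single left-to-right cursor scan: an explicit state machine that consumes the opening parenthesis and quote, accumulates the type up to the closing quote, checks the delimiter by 3-char lookahead, builds each field character by character, and validates the trailing closing parenthesis only when the scan reaches the end.
import Mathlib
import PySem

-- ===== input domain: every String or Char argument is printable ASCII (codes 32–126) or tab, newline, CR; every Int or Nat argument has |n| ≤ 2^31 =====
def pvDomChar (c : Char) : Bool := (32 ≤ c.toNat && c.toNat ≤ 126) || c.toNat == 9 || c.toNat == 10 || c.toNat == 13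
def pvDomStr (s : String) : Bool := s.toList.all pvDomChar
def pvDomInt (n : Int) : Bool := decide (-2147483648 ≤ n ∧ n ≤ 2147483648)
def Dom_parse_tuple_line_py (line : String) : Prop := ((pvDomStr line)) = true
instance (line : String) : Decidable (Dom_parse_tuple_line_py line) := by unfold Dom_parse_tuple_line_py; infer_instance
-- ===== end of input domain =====

-- B replaces A's staged startswith/endswith/find/slice/split pipeline by one
-- left-to-right character scan (explicit state machine); objective: alternative.

-- ===== PORT A =====
-- Literal transliteration of _parse_tuple_line: guard chain, find('"', 1), slices, split.
def parse_tuple_line_py (line : String) : Option (String × List String) :=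
  let cs := line.toList
  if !(PySem.Chars.startswith cs "(\"".toList && PySem.Chars.endswith cs ")".toList) then none
  else
    let inner := PySem.Chars.slice cs (some 1) (some (-1))
    if !PySem.Chars.startswith inner "\"".toList then none
    else
      let type_end := PySem.Chars.findFrom inner "\"".toList 1 none
      if type_end == -1 then none
      else
        let tuple_type := PySem.Chars.lower (PySem.Chars.strip (PySem.Chars.slice inner (some 1) (some type_end)))
        let remaining := PySem.Chars.slice inner (some (type_end + 1)) none
        if !PySem.Chars.startswith remaining "<|>".toList then none
        else
          let remaining2 := PySem.Chars.slice remaining (some 3) none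
          let fields := (PySem.Chars.splitOn remaining2 "<|>".toList).map (fun f => String.ofList (PySem.Chars.strip f))
          some (String.ofList tuple_type, fields)

-- ===== PORT B =====
-- B's type-scanning loop: accumulate chars up to the first '"'; none = cursor hit the end.
def pvScanType : List Char → Option (List Char × List Char)
  | [] => none
  | c :: t => if c = '"' then some ([], t) else (pvScanType t).map (fun p => (c :: p.1, p.2))

-- B's field-scanning loop: cur is the current field accumulator (reversed, as a
-- consed list); on '<' '|' '>' lookahead emit the field, at the end check that the
-- last accumulated char is ')' and drop it.
def pvScanFields (cur : List Char) : List Char → Option (List (List Char))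
  | [] => match cur with
          | ')' :: a => some [a.reverse]
          | _ => none
  | c :: t =>
      if c = '<' ∧ t.take 2 = ['|', '>'] then
        (pvScanFields [] (t.drop 2)).map (cur.reverse :: ·)
      else
        pvScanFields (c :: cur) t
  termination_by l => l.length
  decreasing_by all_goals simp

def parse_tuple_line_py_alt (line : String) : Option (String × List String) :=
  match line.toList with
  | c1 :: c2 :: rest =>
    if c1 = '(' ∧ c2 = '"' then
      match pvScanType rest with
      | none => none
      | some (tp, after) =>
        match after with
        | [] => none
        | c :: t =>
          if c = '<' ∧ t.take 2 = ['|', '>'] then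
            match pvScanFields [] (t.drop 2) with
            | none => none
            | some raws =>
              some (String.ofList (PySem.Chars.lower (PySem.Chars.strip tp)),
                    raws.map (fun f => String.ofList (PySem.Chars.strip f)))
          else none
    else none
  | _ => none

-- ===== PRECONDITION & SPEC =====
def Spec_parse_tuple_line_py (line : String) (out : Option (String × List String)) : Prop := out = parse_tuple_line_py_alt line
instance (line : String) (out : Option (String × List String)) : Decidable (Spec_parse_tuple_line_py line out) := by unfold Spec_parse_tuple_line_py; infer_instance

-- ===== CLAIM (what is proved, stated in full; the proofs are below) =====
def Claim_equal_parse_tuple_line_py : Prop := ∀ (line : String), Dom_parse_tuple_line_py line → Spec_parse_tuple_line_py line (parse_tuple_line_py line)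

-- ===== LEMMAS AND PROOFS =====

-- step equations for B's field-scan loop (well-founded recursion)
lemma pvScanFieldsNil (cur : List Char) :
    pvScanFields cur [] = match cur with
      | ')' :: a => some [a.reverse]
      | _ => none := by
  rw [pvScanFields.eq_def]

lemma pvScanFieldsCons (cur : List Char) (c : Char) (t : List Char) :
    pvScanFields cur (c :: t) =
      (if c = '<' ∧ t.take 2 = ['|', '>'] then
        (pvScanFields [] (t.drop 2)).map (cur.reverse :: ·)
      else pvScanFields (c :: cur) t) := by
  rw [pvScanFields.eq_def]

lemma pvScanType_none (m : List Char) (h : '"' ∉ m) : pvScanType m = none := by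
  induction m with
  | nil => rfl
  | cons c t ih =>
    rw [pvScanType, if_neg (fun hc => h (by simp [hc])), ih (fun hm => h (by simp [hm]))]
    rfl

lemma pvScanType_app (a b : List Char) (h : '"' ∉ a) :
    pvScanType (a ++ '"' :: b) = some (a, b) := by
  induction a with
  | nil => simp [pvScanType]
  | cons c t ih =>
    rw [List.cons_append, pvScanType, if_neg (fun hc => h (by simp [hc])),
        ih (fun hm => h (by simp [hm]))]
    rfl

lemma pvScanType_suffix (l tp after : List Char) (h : pvScanType l = some (tp, after)) :
    ∃ pre, l = pre ++ '"' :: after := by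
  induction l generalizing tp with
  | nil => simp [pvScanType] at h
  | cons c t ih =>
    rw [pvScanType] at h
    by_cases hc : c = '"'
    · rw [if_pos hc] at h
      simp at h
      exact ⟨[], by simp [hc, h.2]⟩
    · rw [if_neg hc] at h
      cases ht : pvScanType t with
      | none => rw [ht] at h; simp at h
      | some p =>
        cases p with
        | mk p1 p2 =>
          rw [ht] at h
          simp at h
          obtain ⟨pre, hpre⟩ := ih p1 (by rw [ht, h.2])
          exact ⟨c :: pre, by simp [hpre]⟩

lemma pvSinglePrefix (c : Char) (l : List Char) : [c] <+: l ↔ l.head? = some c := by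
  cases l with
  | nil => simp
  | cons x t =>
    constructor
    · rintro ⟨s, hs⟩; simp at hs; simp [hs.1]
    · intro h; simp at h; exact ⟨t, by simp [h]⟩

lemma pvFindQuote (a b : List Char) (h : '"' ∉ a) :
    PySem.Chars.find (a ++ '"' :: b) ['"'] = (a.length : Int) := by
  set m := a ++ '"' :: b with hm
  have hinf : ['"'] <:+: m := ⟨a, b, by simp [hm]⟩
  have hnn : 0 ≤ PySem.Chars.find m ['"'] := (PySem.Chars.find_nonneg_iff m ['"']).2 hinf
  obtain ⟨hpre, hmin⟩ := PySem.Chars.find_spec hnn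
  have hle : PySem.Chars.find m ['"'] ≤ m.length := PySem.Chars.find_le_length m ['"']
  have hgetA : m[a.length]? = some '"' := by
    rw [hm, List.getElem?_append_right (le_refl _)]
    simp
  have hlow : ¬ (PySem.Chars.find m ['"']).toNat < a.length := by
    intro hlt
    have hp : ['"'] <+: m.drop (PySem.Chars.find m ['"']).toNat := hpre
    rw [pvSinglePrefix, List.head?_drop] at hp
    rw [hm, List.getElem?_append_left hlt] at hp
    exact h (List.mem_of_getElem? hp)
  have hhigh : ¬ a.length < (PySem.Chars.find m ['"']).toNat := by
    intro hlt
    have hmin' := hmin a.length hlt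
    rw [pvSinglePrefix, List.head?_drop] at hmin'
    exact hmin' hgetA
  omega

lemma pvMemSplit (m : List Char) (h : '"' ∈ m) : ∃ a b, m = a ++ '"' :: b ∧ '"' ∉ a := by
  induction m with
  | nil => cases h
  | cons c t ih =>
    by_cases hc : c = '"'
    · exact ⟨[], t, by simp [hc], by simp⟩
    · have ht : '"' ∈ t := by
        rcases List.mem_cons.1 h with h' | h'
        · exact absurd h'.symm hc
        · exact h'
      obtain ⟨a, b, h1, h2⟩ := ih ht
      refine ⟨c :: a, b, by simp [h1], ?_⟩
      intro hmem
      rcases List.mem_cons.1 hmem with h' | h'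
      · exact hc h'.symm
      · exact h2 h'

lemma pvSingleInfix (m : List Char) : ['"'] <:+: m ↔ '"' ∈ m := by
  constructor
  · rintro ⟨s, t, h⟩; subst h; simp
  · intro h
    obtain ⟨a, b, hab, _⟩ := pvMemSplit m h
    exact ⟨a, b, by simp [hab]⟩

-- step equations for PySem's split loop
lemma pvGoZero (sep l cur : List Char) (acc : List (List Char)) :
    PySem.Chars.splitOn.go sep 0 l cur acc = ((cur.reverse ++ l) :: acc).reverse := by
  rw [PySem.Chars.splitOn.go.eq_def]

lemma pvGoNil (sep cur : List Char) (acc : List (List Char)) (fuel : ℕ) :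
    PySem.Chars.splitOn.go sep (fuel + 1) [] cur acc = (cur.reverse :: acc).reverse := by
  rw [PySem.Chars.splitOn.go.eq_def]

lemma pvGoCons (sep : List Char) (c : Char) (rest cur : List Char) (acc : List (List Char)) (fuel : ℕ) :
    PySem.Chars.splitOn.go sep (fuel + 1) (c :: rest) cur acc =
      (if sep.isPrefixOf (c :: rest) then
        PySem.Chars.splitOn.go sep fuel (List.drop sep.length (c :: rest)) [] (cur.reverse :: acc)
      else PySem.Chars.splitOn.go sep fuel rest (c :: cur) acc) := by
  rw [PySem.Chars.splitOn.go.eq_def]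

-- accumulator lemma for PySem's split loop
lemma pvGoAcc (sep : List Char) (fuel : ℕ) : ∀ (l cur : List Char) (acc : List (List Char)),
    PySem.Chars.splitOn.go sep fuel l cur acc
      = acc.reverse ++ PySem.Chars.splitOn.go sep fuel l cur [] := by
  induction fuel with
  | zero => intro l cur acc; simp [pvGoZero]
  | succ fuel ih =>
    intro l cur acc
    cases l with
    | nil => simp [pvGoNil]
    | cons c rest =>
      rw [pvGoCons, pvGoCons]
      by_cases hp : sep.isPrefixOf (c :: rest) = true
      · rw [if_pos hp, if_pos hp, ih _ _ (cur.reverse :: acc), ih _ _ [cur.reverse]]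
        simp
      · rw [if_neg hp, if_neg hp, ih rest (c :: cur) acc]

-- B's field scan on (l ++ [')']) computes exactly PySem's split loop on l.
lemma pvScanGo (fuel : ℕ) : ∀ (l cur : List Char), l.length < fuel →
    pvScanFields cur (l ++ [')'])
      = some (PySem.Chars.splitOn.go ['<', '|', '>'] fuel l cur []) := by
  induction fuel with
  | zero => intro l cur h; omega
  | succ fuel ih =>
    intro l cur h
    cases l with
    | nil =>
      rw [pvGoNil, List.nil_append, pvScanFieldsCons,
          if_neg (by simp), pvScanFieldsNil]
      simp
    | cons c rest =>
      rw [List.cons_append, pvScanFieldsCons, pvGoCons]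
      by_cases hd : c = '<' ∧ rest.take 2 = ['|', '>']
      · have hlen : 2 ≤ rest.length := by
          have := congrArg List.length hd.2
          simp [Nat.min_def] at this
          omega
        have htk : (rest ++ [')']).take 2 = ['|', '>'] := by
          rw [List.take_append_of_le_length hlen, hd.2]
        have hpref : (['<', '|', '>'] : List Char).isPrefixOf (c :: rest) = true := by
          rw [List.isPrefixOf_iff_prefix]
          have : rest = ['|', '>'] ++ rest.drop 2 := by
            conv_lhs => rw [← List.take_append_drop 2 rest]
            rw [hd.2]
          refine ⟨rest.drop 2, ?_⟩
          rw [hd.1]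
          conv_rhs => rw [this]
          rfl
        rw [if_pos ⟨hd.1, htk⟩, if_pos hpref]
        have hdrop : (rest ++ [')']).drop 2 = rest.drop 2 ++ [')'] := by
          rw [List.drop_append_of_le_length hlen]
        rw [hdrop, ih (rest.drop 2) [] (by simp at h ⊢; omega)]
        rw [pvGoAcc _ fuel _ _ [cur.reverse]]
        simp
      · have hd' : ¬ (c = '<' ∧ (rest ++ [')']).take 2 = ['|', '>']) := by
          rintro ⟨hc, htk⟩
          apply hd
          refine ⟨hc, ?_⟩
          cases rest with
          | nil => simp at htk
          | cons x rs =>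
            cases rs with
            | nil => simp at htk
            | cons y rs' => simpa using htk
        have hpref : (['<', '|', '>'] : List Char).isPrefixOf (c :: rest) = false := by
          rw [Bool.eq_false_iff]
          intro hp
          rw [List.isPrefixOf_iff_prefix] at hp
          obtain ⟨t, ht⟩ := hp
          simp at ht
          refine hd ⟨ht.1.symm, ?_⟩
          rw [← ht.2]
          rfl
        rw [if_neg hd', hpref, if_neg (by simp)]
        exact ih rest (c :: cur) (by simp at h ⊢; omega)

-- B's field scan fails when the last character is not ')'.
lemma pvScanFields_none (cur l : List Char)
    (h : (cur.reverse ++ l).getLast? ≠ some ')') : pvScanFields cur l = none := by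
  induction cur, l using pvScanFields.induct with
  | case1 a =>
    exact absurd (by simp) h
  | case2 cur hne =>
    rw [pvScanFieldsNil]
    split
    · exact absurd (by simp) h
    · rfl
  | case3 cur c t hc ih =>
    rw [pvScanFieldsCons, if_pos hc]
    rw [ih ?_]
    · rfl
    · simp only [List.reverse_nil, List.nil_append]
      intro hgl
      apply h
      have hne : t.drop 2 ≠ [] := by
        intro h0; rw [h0] at hgl; simp at hgl
      have ht : t = ['|', '>'] ++ t.drop 2 := by
        conv_lhs => rw [← List.take_append_drop 2 t]
        rw [hc.2]
      calc (cur.reverse ++ c :: t).getLast?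
          = ((cur.reverse ++ [c, '|', '>']) ++ t.drop 2).getLast? := by
            conv_lhs => rw [ht]
            simp
        _ = (t.drop 2).getLast? := List.getLast?_append_of_ne_nil _ hne
        _ = some ')' := hgl
  | case4 cur c t hc ih =>
    rw [pvScanFieldsCons, if_neg hc]
    apply ih
    intro hgl
    apply h
    rw [← hgl]
    simp

lemma pvEndLast (cs : List Char) :
    PySem.Chars.endswith cs ")".toList = true ↔ cs.getLast? = some ')' := by
  rw [PySem.Chars.endswith_iff]
  constructor
  · rintro ⟨t, ht⟩
    rw [← ht, show (")".toList) = [')'] by decide]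
    simp
  · intro h
    obtain ⟨l', hl⟩ := List.getLast?_eq_some_iff.mp h
    exact ⟨l', by rw [hl, show (")".toList) = [')'] by decide]⟩

lemma pvMain (line : String) : parse_tuple_line_py line = parse_tuple_line_py_alt line := by
  unfold parse_tuple_line_py parse_tuple_line_py_alt
  dsimp only
  cases hcs : line.toList with
  | nil => simp [PySem.Chars.startswith, List.isPrefixOf]
  | cons c1 t1 =>
    cases t1 with
    | nil =>
      rw [show PySem.Chars.startswith [c1] "(\"".toList = false by
        simp [PySem.Chars.startswith, List.isPrefixOf]]
      simp
    | cons c2 t2 =>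
      dsimp only
      by_cases h12 : c1 = '(' ∧ c2 = '"'
      · obtain ⟨h1, h2⟩ := h12
        subst h1; subst h2
        rw [if_pos (show ('(' = '(' ∧ '"' = '"') from ⟨rfl, rfl⟩)]
        have hsw : PySem.Chars.startswith ('(' :: '"' :: t2) "(\"".toList = true := by
          simp [PySem.Chars.startswith]
        by_cases hend : PySem.Chars.endswith ('(' :: '"' :: t2) ")".toList = true
        · have hlast := (pvEndLast _).mp hend
          have hex : ∃ m, t2 = m ++ [')'] := by
            obtain ⟨l', hl⟩ := List.getLast?_eq_some_iff.mp hlast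
            cases l' with
            | nil => simp at hl
            | cons x l'' =>
              cases l'' with
              | nil => simp at hl
              | cons y l3 =>
                simp at hl
                exact ⟨l3, hl.2.2⟩
          obtain ⟨m, hm⟩ := hex
          subst hm
          rw [hsw, hend]
          simp only [Bool.and_self, Bool.not_true, Bool.false_eq_true, if_false]
          have hA1 : PySem.Chars.slice ('(' :: '"' :: (m ++ [')'])) (some 1) (some (-1)) = '"' :: m := by
            simp [PySem.List.slice]
          rw [hA1]
          have hstart : PySem.Chars.startswith ('"' :: m) "\"".toList = true := by
            rw [PySem.Chars.startswith_iff]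
            exact ⟨m, by rfl⟩
          have hff : PySem.Chars.findFrom ('"' :: m) "\"".toList 1 none =
              (if PySem.Chars.find m ['"'] = -1 then -1 else 1 + PySem.Chars.find m ['"']) := by
            have h := PySem.Chars.findFrom_natCast ('"' :: m) ['"'] 1 (by simp)
            simpa using h
          by_cases hq : '"' ∈ m
          · obtain ⟨a, b, hab, hna⟩ := pvMemSplit m hq
            subst hab
            have hfind : PySem.Chars.find (a ++ '"' :: b) ['"'] = (a.length : Int) := pvFindQuote a b hna
            have hff2 : PySem.Chars.findFrom ('"' :: (a ++ '"' :: b)) "\"".toList 1 none = 1 + (a.length : Int) := by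
              rw [hff, hfind, if_neg (by omega)]
            have hTa : PySem.Chars.slice ('"' :: a ++ '"' :: b) (some 1) (some (1 + (a.length : Int))) = a := by
              have h1 : (1 : Int) + (a.length : Int) = ((1 + a.length : Nat) : Int) := by push_cast; ring
              have h2 : (1 : Int) = ((1 : Nat) : Int) := rfl
              rw [h1, h2, PySem.Chars.slice_eq_listSlice, PySem.List.slice_natCast]
              simp
            have hRem : PySem.Chars.slice ('"' :: a ++ '"' :: b) (some ((1 + (a.length : Int)) + 1)) none = b := by
              rw [PySem.Chars.slice_eq_listSlice, PySem.List.slice_from (ha := by positivity)]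
              have h3 : ((1 + (a.length : Int)) + 1).toNat = (a.length + 1) + 1 := by omega
              rw [h3]
              simp [List.drop_append]
            rw [hstart, hff2]
            simp only [Bool.not_true, Bool.false_eq_true, if_false]
            rw [if_neg (by simp; omega)]
            rw [show ('"' :: (a ++ '"' :: b)) = ('"' :: a ++ '"' :: b) by simp, hTa, hRem]
            have hscan : pvScanType ((a ++ '"' :: b) ++ [')']) = some (a, b ++ [')']) := by
              rw [show (a ++ '"' :: b) ++ [')'] = a ++ '"' :: (b ++ [')']) by simp]
              exact pvScanType_app _ _ hna
            rw [hscan]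
            dsimp only
            by_cases hdel : PySem.Chars.startswith b "<|>".toList = true
            · rw [PySem.Chars.startswith_iff] at hdel
              obtain ⟨bt, hbt⟩ := hdel
              rw [show ("<|>".toList) = ['<', '|', '>'] by decide] at hbt
              obtain ⟨hb⟩ : b = '<' :: '|' :: '>' :: bt := by rw [← hbt]; rfl
              have hdel' : PySem.Chars.startswith ('<' :: '|' :: '>' :: bt) "<|>".toList = true := by
                rw [PySem.Chars.startswith_iff, show ("<|>".toList) = ['<', '|', '>'] by decide]
                exact ⟨bt, rfl⟩
              rw [hdel']
              simp only [Bool.not_true, Bool.false_eq_true, if_false]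
              have hR2 : PySem.Chars.slice ('<' :: '|' :: '>' :: bt) (some 3) none = bt := by
                simp [PySem.List.slice]
              rw [hR2]
              rw [show ('<' :: '|' :: '>' :: bt) ++ [')'] = '<' :: ('|' :: '>' :: bt ++ [')']) by rfl]
              dsimp only
              rw [if_pos ⟨rfl, by rfl⟩]
              rw [show ('|' :: '>' :: bt ++ [')']).drop 2 = bt ++ [')'] by rfl]
              rw [pvScanGo (bt.length + 1) bt [] (by omega)]
              rfl
            · have hef : PySem.Chars.startswith b "<|>".toList = false := by
                revert hdel; cases PySem.Chars.startswith b "<|>".toList <;> simp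
              rw [hef]
              simp only [Bool.not_false, if_true]
              cases b with
              | nil => rfl
              | cons x bs =>
                rw [show (x :: bs) ++ [')'] = x :: (bs ++ [')']) by rfl]
                dsimp only
                refine Eq.symm (if_neg ?_)
                rintro ⟨hx, htk⟩
                cases bs with
                | nil => simp at htk
                | cons y bs1 =>
                  cases bs1 with
                  | nil => simp at htk
                  | cons z bs2 =>
                    simp at htk
                    rw [hx, htk.1, htk.2] at hef
                    simp [PySem.Chars.startswith, List.isPrefixOf] at hef
          · have hno : PySem.Chars.find m ['"'] = -1 :=
              (PySem.Chars.find_eq_neg_one_iff _ _).mpr (fun hin => hq ((pvSingleInfix m).1 hin))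
            rw [hstart, hff, if_pos hno]
            simp only [Bool.not_true, Bool.false_eq_true, if_false]
            rw [if_pos (by decide)]
            rw [pvScanType_none (m ++ [')']) (by simp [hq])]
        · have hef : PySem.Chars.endswith ('(' :: '"' :: t2) ")".toList = false := by
            revert hend; cases PySem.Chars.endswith ('(' :: '"' :: t2) ")".toList <;> simp
          rw [hsw, hef]
          simp only [Bool.and_false, Bool.not_false, if_true]
          have hlast : ¬ t2.getLast? = some ')' := by
            intro hl
            apply hend
            rw [pvEndLast]
            cases ht2 : t2 with
            | nil => rw [ht2] at hl; simp at hl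
            | cons z zs =>
              rw [← ht2]
              rw [show ('(' :: '"' :: t2) = ['(', '"'] ++ t2 by rfl]
              rw [List.getLast?_append_of_ne_nil _ (by rw [ht2]; simp)]
              exact hl
          cases hst : pvScanType t2 with
          | none => rfl
          | some p =>
            cases p with
            | mk tp after =>
              dsimp only
              obtain ⟨pre, hpre⟩ := pvScanType_suffix t2 tp after hst
              cases after with
              | nil => rfl
              | cons c t =>
                dsimp only
                by_cases hc : c = '<' ∧ t.take 2 = ['|', '>']
                · rw [if_pos hc]
                  rw [pvScanFields_none [] (t.drop 2) (by
                    simp only [List.reverse_nil, List.nil_append]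
                    intro hgl
                    apply hlast
                    have hne : t.drop 2 ≠ [] := by
                      intro h0; rw [h0] at hgl; simp at hgl
                    have ht : t = ['|', '>'] ++ t.drop 2 := by
                      conv_lhs => rw [← List.take_append_drop 2 t]
                      rw [hc.2]
                    rw [hpre]
                    calc (pre ++ '"' :: c :: t).getLast?
                        = ((pre ++ '"' :: c :: ['|', '>']) ++ t.drop 2).getLast? := by
                          conv_lhs => rw [ht]
                          simp
                      _ = (t.drop 2).getLast? := List.getLast?_append_of_ne_nil _ hne
                      _ = some ')' := hgl)]
                · rw [if_neg hc]
      · rw [if_neg h12]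
        have hswf : PySem.Chars.startswith (c1 :: c2 :: t2) "(\"".toList = false := by
          rw [Bool.eq_false_iff]
          intro hp
          rw [PySem.Chars.startswith_iff, show ("(\"".toList) = ['(', '"'] by decide] at hp
          obtain ⟨t, ht⟩ := hp
          simp at ht
          exact h12 ⟨ht.1.symm, ht.2.1.symm⟩
        rw [hswf]
        simp

-- ===== VERDICT (by name: the statement is the Claim_ definition above) =====
theorem parse_tuple_line_py_spec : Claim_equal_parse_tuple_line_py := by
  intro line _
  unfold Spec_parse_tuple_line_py
  exact pvMain line
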